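-- pv_equiv track=rewrite | github.com/meldrum2718/explorations | code/ftn/function_tensor_network.py | interlaced_perm
-- ===== SOURCE A (Python) =====
-- def interlaced_perm(d):
--     """
--     Creates an interlaced permutation as a tuple of length d.
--
--     For even d:
--       - Even positions (0,2,4,...) get filled with (0,1,2,...,d//2-1)
--       - Odd positions (1,3,5,...) get filled with (d//2,d//2+1,...,d-1)
--
--     For odd d:
--       - Even positions (0,2,4,...) get filled with (d//2,d//2+1,...,d-1)
--       - Odd positions (1,3,5,...) get filled with (0,1,2,...,d//2-1)
--
--     Args:
--         d: Integer length of permutation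
--
--     Returns:
--         tuple: Interlaced permutation indices
--     """
--     offset = d % 2  # 1 if odd, 0 if even
--     first_half = list(range(d//2))
--     second_half = list(range(d//2, d))
--     indices = [0] * d
--
--     # Positions determined by offset
--     for i in range(offset, d, 2):
--         indices[i] = first_half[i//2 - offset//2]
--
--     for i in range(1-offset, d, 2):
--         indices[i] = second_half[(i-(1-offset))//2]
--
--     return tuple(indices)
-- ===== SOURCE B (Python) =====
-- def interlaced_perm(d):
--     first = list(range(d // 2))
--     second = list(range(d // 2, d))
--     a, b = (first, second) if d % 2 == 0 else (second, first)
--     out = []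
--     for x, y in zip(a, b):
--         out.extend((x, y))
--     if len(b) < len(a):
--         out.append(a[-1])
--     return tuple(out)
-- ===== Notes on version B (the rewrite author's own statement) =====
-- stated objective: idiomatic
-- what changed: B replaces A's two strided index-assignment loops into a preallocated [0]*d buffer by building the two halves, pairing them with zip (longer half leading when d is odd) and flattening the pairs, appending the one leftover element for odd d.
import Mathlib
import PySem

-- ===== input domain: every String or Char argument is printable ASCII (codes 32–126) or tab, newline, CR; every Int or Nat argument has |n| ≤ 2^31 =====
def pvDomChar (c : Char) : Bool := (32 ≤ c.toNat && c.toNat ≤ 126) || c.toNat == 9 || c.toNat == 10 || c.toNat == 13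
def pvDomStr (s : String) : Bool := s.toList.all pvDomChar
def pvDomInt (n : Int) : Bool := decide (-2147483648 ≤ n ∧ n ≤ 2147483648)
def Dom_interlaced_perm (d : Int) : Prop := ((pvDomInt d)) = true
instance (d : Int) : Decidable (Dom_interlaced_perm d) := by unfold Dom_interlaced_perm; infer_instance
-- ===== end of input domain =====

-- B builds the two halves and interleaves them pairwise with zip (longer half leading for odd d)
-- instead of A's two strided index-assignment loops into a preallocated buffer; same O(d) cost, more idiomatic.


-- ===== PORT A =====
-- Literal port of A.  [0]*d is List.replicate d.toNat 0 ([] for d < 0, as in Python).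
-- The pyGetD/pySetD defaults are never reached: every index A uses is in range on every input.
def interlaced_perm (d : Int) : List Int :=
  let offset := PySem.Int.mod d 2
  let first_half := PySem.List.pyRange 0 (PySem.Int.floordiv d 2) 1
  let second_half := PySem.List.pyRange (PySem.Int.floordiv d 2) d 1
  let indices : List Int := List.replicate d.toNat 0
  let indices := (PySem.List.pyRange offset d 2).foldl
    (fun acc i => PySem.List.pySetD acc i
      (PySem.List.pyGetD first_half (PySem.Int.floordiv i 2 - PySem.Int.floordiv offset 2) 0)) indices
  let indices := (PySem.List.pyRange (1 - offset) d 2).foldl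
    (fun acc i => PySem.List.pySetD acc i
      (PySem.List.pyGetD second_half (PySem.Int.floordiv (i - (1 - offset)) 2) 0)) indices
  indices

-- ===== PORT B =====
-- Literal port of Source B.  a[-1] is pyGetD ab.1 (-1) 0 (only evaluated when a is the longer, nonempty half).
def interlaced_perm_alt (d : Int) : List Int :=
  let first := PySem.List.pyRange 0 (PySem.Int.floordiv d 2) 1
  let second := PySem.List.pyRange (PySem.Int.floordiv d 2) d 1
  let ab := if PySem.Int.mod d 2 == 0 then (first, second) else (second, first)
  let out := (ab.1.zip ab.2).foldl (fun acc p => acc ++ [p.1, p.2]) []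
  if ab.2.length < ab.1.length then out ++ [PySem.List.pyGetD ab.1 (-1) 0] else out

-- ===== PRECONDITION & SPEC =====
def Spec_interlaced_perm (d : Int) (out : List Int) : Prop := out = interlaced_perm_alt d
instance (d : Int) (out : List Int) : Decidable (Spec_interlaced_perm d out) := by unfold Spec_interlaced_perm; infer_instance

-- ===== CLAIM (what is proved, stated in full; the proofs are below) =====
def Claim_equal_interlaced_perm : Prop := ∀ (d : Int), Dom_interlaced_perm d → Spec_interlaced_perm d (interlaced_perm d)

-- ===== LEMMAS AND PROOFS =====

-- the common value at position k of the length-2m (even) and length-2m+1 (odd) permutations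
def pvVE (m k : Nat) : Int := if k % 2 = 0 then ((k / 2 : Nat) : Int) else (m : Int) + ((k / 2 : Nat) : Int)
def pvVO (m k : Nat) : Int := if k % 2 = 0 then (m : Int) + ((k / 2 : Nat) : Int) else ((k / 2 : Nat) : Int)

theorem pv_fdiv2 (d : Int) : PySem.Int.floordiv d 2 = d / 2 := by
  simp [PySem.Int.floordiv, Int.fdiv_eq_ediv]

theorem pv_fmod2 (d : Int) : PySem.Int.mod d 2 = d % 2 := by
  simp [PySem.Int.mod, Int.fmod_eq_emod]

theorem pv_pyRange_two_nil (a b : Int) (h : b ≤ a) : PySem.List.pyRange a b 2 = [] := by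
  rw [PySem.List.pyRange_of_pos _ _ (by norm_num), if_neg (by omega)]; rfl

theorem pv_nodup_pyRange_two (a b : Int) : (PySem.List.pyRange a b 2).Nodup := by
  rw [PySem.List.pyRange_of_pos _ _ (by norm_num)]
  exact List.Nodup.map (fun x y h => by omega) List.nodup_range

theorem pv_length_foldl_pySetD (g : Int → Int) (l : List Int) (init : List Int) :
    (l.foldl (fun acc i => PySem.List.pySetD acc i (g i)) init).length = init.length := by
  induction l generalizing init with
  | nil => rfl
  | cons i t ih => rw [List.foldl_cons, ih]; exact PySem.List.length_pySetD init i (g i)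

theorem pv_getD_foldl_pySetD_notmem (g : Int → Int) (l : List Int) (init : List Int) (k n : Nat)
    (hmem : (k : Int) ∉ l) (hr : ∀ i ∈ l, 0 ≤ i ∧ i.toNat < n) (hlen : init.length = n) :
    PySem.List.pyGetD (l.foldl (fun acc i => PySem.List.pySetD acc i (g i)) init) (k : Int) 0
      = PySem.List.pyGetD init (k : Int) 0 := by
  induction l generalizing init with
  | nil => rfl
  | cons i t ih =>
    obtain ⟨h0, hl⟩ := hr i (List.mem_cons_self ..)
    have hi : i = ((i.toNat : Nat) : Int) := by omega
    have hkne : (k : Int) ≠ i := fun h => hmem (h ▸ List.mem_cons_self ..)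
    rw [List.foldl_cons]
    rw [ih (PySem.List.pySetD init i (g i)) (fun h => hmem (List.mem_cons_of_mem _ h))
          (fun j hj => hr j (List.mem_cons_of_mem _ hj))
          (by rw [PySem.List.length_pySetD]; exact hlen)]
    rw [hi, PySem.List.pyGetD_pySetD_natCast init i.toNat k (g ((i.toNat : Nat) : Int)) 0
          (by omega), if_neg (by omega)]

theorem pv_getD_foldl_pySetD_mem (g : Int → Int) (l : List Int) (init : List Int) (k n : Nat)
    (hnd : l.Nodup) (hmem : (k : Int) ∈ l) (hr : ∀ i ∈ l, 0 ≤ i ∧ i.toNat < n)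
    (hlen : init.length = n) :
    PySem.List.pyGetD (l.foldl (fun acc i => PySem.List.pySetD acc i (g i)) init) (k : Int) 0
      = g (k : Int) := by
  induction l generalizing init with
  | nil => cases hmem
  | cons i t ih =>
    obtain ⟨h0, hl⟩ := hr i (List.mem_cons_self ..)
    rw [List.foldl_cons]
    by_cases hik : (k : Int) = i
    · have hkt : (k : Int) ∉ t := by
        intro h; exact (List.nodup_cons.mp hnd).1 (hik ▸ h)
      rw [pv_getD_foldl_pySetD_notmem g t (PySem.List.pySetD init i (g i)) k n hkt
            (fun j hj => hr j (List.mem_cons_of_mem _ hj))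
            (by rw [PySem.List.length_pySetD]; exact hlen)]
      have hk : i = ((k : Nat) : Int) := hik.symm
      subst hk
      rw [PySem.List.pyGetD_pySetD_natCast init k k (g k) 0 (by omega), if_pos rfl]
    · have hkt : (k : Int) ∈ t := by
        rcases List.mem_cons.mp hmem with h | h
        · exact absurd h hik
        · exact h
      exact ih (PySem.List.pySetD init i (g i)) (List.nodup_cons.mp hnd).2 hkt
        (fun j hj => hr j (List.mem_cons_of_mem _ hj))
        (by rw [PySem.List.length_pySetD]; exact hlen)

theorem pv_ext_pyGetD (xs ys : List Int) (hlen : xs.length = ys.length)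
    (h : ∀ k : Nat, k < xs.length →
      PySem.List.pyGetD xs (k : Int) 0 = PySem.List.pyGetD ys (k : Int) 0) : xs = ys := by
  apply List.ext_getElem hlen
  intro k h1 h2
  have hk := h k h1
  rw [PySem.List.pyGetD_eq_getElem xs 0 (by omega) (by exact_mod_cast h1),
      PySem.List.pyGetD_eq_getElem ys 0 (by omega) (by exact_mod_cast h2)] at hk
  simpa using hk

theorem pv_map_range_two (v : Nat → Int) (m : Nat) :
    (List.range (2 * m)).map v = (List.range m).flatMap (fun j => [v (2 * j), v (2 * j + 1)]) := by
  induction m with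
  | zero => rfl
  | succ m ih =>
    rw [show 2 * (m + 1) = (2 * m + 1) + 1 by ring, List.range_succ, List.range_succ,
        List.map_append, List.map_append, List.range_succ, List.flatMap_append, ← ih]
    simp

-- ===== A-side closed forms =====

theorem pv_A_even (m : Nat) :
    interlaced_perm (2 * (m : Int)) = (List.range (2 * m)).map (pvVE m) := by
  have h1 : (2 * (m : Int)) / 2 = (m : Int) := by omega
  have h2 : (2 * (m : Int)) % 2 = 0 := by omega
  have h3 : (2 * (m : Int)).toNat = 2 * m := by omega
  simp only [interlaced_perm, pv_fdiv2, pv_fmod2, h1, h2, h3, Int.zero_ediv, sub_zero]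
  apply pv_ext_pyGetD
  · rw [pv_length_foldl_pySetD, pv_length_foldl_pySetD]
    simp
  · intro k hk
    rw [pv_length_foldl_pySetD, pv_length_foldl_pySetD, List.length_replicate] at hk
    have hr1 : ∀ i ∈ PySem.List.pyRange 0 (2 * (m : Int)) 2, 0 ≤ i ∧ i.toNat < 2 * m := by
      intro i hi
      rw [PySem.List.mem_pyRange_iff_of_pos (by norm_num)] at hi
      omega
    have hr2 : ∀ i ∈ PySem.List.pyRange 1 (2 * (m : Int)) 2, 0 ≤ i ∧ i.toNat < 2 * m := by
      intro i hi
      rw [PySem.List.mem_pyRange_iff_of_pos (by norm_num)] at hi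
      omega
    have hlen1 : (List.replicate (2 * m) (0 : Int)).length = 2 * m := by simp
    by_cases hk2 : k % 2 = 0
    · have hnot : ((k : Int)) ∉ PySem.List.pyRange 1 (2 * (m : Int)) 2 := by
        rw [PySem.List.mem_pyRange_iff_of_pos (by norm_num)]
        rintro ⟨ha, hb, hc⟩
        omega
      rw [pv_getD_foldl_pySetD_notmem _ _ _ k (2 * m) hnot hr2
            (by rw [pv_length_foldl_pySetD]; exact hlen1)]
      have hmem1 : ((k : Int)) ∈ PySem.List.pyRange 0 (2 * (m : Int)) 2 := by
        rw [PySem.List.mem_pyRange_iff_of_pos (by norm_num)]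
        refine ⟨by omega, by omega, by omega⟩
      rw [pv_getD_foldl_pySetD_mem _ _ _ k (2 * m) (pv_nodup_pyRange_two _ _) hmem1 hr1 hlen1]
      rw [PySem.List.pyGetD_natCast, PySem.List.getD_map_range _ _ _ _ hk]
      rw [PySem.List.pyGetD_eq_getElem _ 0 (by omega)
            (by rw [PySem.List.length_pyRange_one]; omega),
          PySem.List.getElem_pyRange_one]
      simp only [pvVE, if_pos hk2]
      omega
    · have hmem2 : ((k : Int)) ∈ PySem.List.pyRange 1 (2 * (m : Int)) 2 := by
        rw [PySem.List.mem_pyRange_iff_of_pos (by norm_num)]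
        refine ⟨by omega, by omega, by omega⟩
      rw [pv_getD_foldl_pySetD_mem _ _ _ k (2 * m) (pv_nodup_pyRange_two _ _) hmem2 hr2
            (by rw [pv_length_foldl_pySetD]; exact hlen1)]
      rw [PySem.List.pyGetD_natCast, PySem.List.getD_map_range _ _ _ _ hk]
      rw [PySem.List.pyGetD_eq_getElem _ 0 (by omega)
            (by rw [PySem.List.length_pyRange_one]; omega),
          PySem.List.getElem_pyRange_one]
      simp only [pvVE, if_neg hk2]
      omega

theorem pv_A_odd (m : Nat) :
    interlaced_perm (2 * (m : Int) + 1) = (List.range (2 * m + 1)).map (pvVO m) := by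
  have h1 : (2 * (m : Int) + 1) / 2 = (m : Int) := by omega
  have h2 : (2 * (m : Int) + 1) % 2 = 1 := by omega
  have h3 : (2 * (m : Int) + 1).toNat = 2 * m + 1 := by omega
  have hone : (1 : Int) / 2 = 0 := by omega
  simp only [interlaced_perm, pv_fdiv2, pv_fmod2, h1, h2, h3, hone, sub_self, sub_zero]
  apply pv_ext_pyGetD
  · rw [pv_length_foldl_pySetD, pv_length_foldl_pySetD]
    simp
  · intro k hk
    rw [pv_length_foldl_pySetD, pv_length_foldl_pySetD, List.length_replicate] at hk
    have hr1 : ∀ i ∈ PySem.List.pyRange 1 (2 * (m : Int) + 1) 2, 0 ≤ i ∧ i.toNat < 2 * m + 1 := by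
      intro i hi
      rw [PySem.List.mem_pyRange_iff_of_pos (by norm_num)] at hi
      omega
    have hr2 : ∀ i ∈ PySem.List.pyRange 0 (2 * (m : Int) + 1) 2, 0 ≤ i ∧ i.toNat < 2 * m + 1 := by
      intro i hi
      rw [PySem.List.mem_pyRange_iff_of_pos (by norm_num)] at hi
      omega
    have hlen1 : (List.replicate (2 * m + 1) (0 : Int)).length = 2 * m + 1 := by simp
    by_cases hk2 : k % 2 = 0
    · have hmem2 : ((k : Int)) ∈ PySem.List.pyRange 0 (2 * (m : Int) + 1) 2 := by
        rw [PySem.List.mem_pyRange_iff_of_pos (by norm_num)]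
        refine ⟨by omega, by omega, by omega⟩
      rw [pv_getD_foldl_pySetD_mem _ _ _ k (2 * m + 1) (pv_nodup_pyRange_two _ _) hmem2 hr2
            (by rw [pv_length_foldl_pySetD]; exact hlen1)]
      rw [PySem.List.pyGetD_natCast, PySem.List.getD_map_range _ _ _ _ hk]
      rw [PySem.List.pyGetD_eq_getElem _ 0 (by omega)
            (by rw [PySem.List.length_pyRange_one]; omega),
          PySem.List.getElem_pyRange_one]
      simp only [pvVO, if_pos hk2]
      omega
    · have hnot : ((k : Int)) ∉ PySem.List.pyRange 0 (2 * (m : Int) + 1) 2 := by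
        rw [PySem.List.mem_pyRange_iff_of_pos (by norm_num)]
        rintro ⟨ha, hb, hc⟩
        omega
      rw [pv_getD_foldl_pySetD_notmem _ _ _ k (2 * m + 1) hnot hr2
            (by rw [pv_length_foldl_pySetD]; exact hlen1)]
      have hmem1 : ((k : Int)) ∈ PySem.List.pyRange 1 (2 * (m : Int) + 1) 2 := by
        rw [PySem.List.mem_pyRange_iff_of_pos (by norm_num)]
        refine ⟨by omega, by omega, by omega⟩
      rw [pv_getD_foldl_pySetD_mem _ _ _ k (2 * m + 1) (pv_nodup_pyRange_two _ _) hmem1 hr1 hlen1]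
      rw [PySem.List.pyGetD_natCast, PySem.List.getD_map_range _ _ _ _ hk]
      rw [PySem.List.pyGetD_eq_getElem _ 0 (by omega)
            (by rw [PySem.List.length_pyRange_one]; omega),
          PySem.List.getElem_pyRange_one]
      simp only [pvVO, if_neg hk2]
      omega

theorem pv_A_neg (d : Int) (hd : d < 0) : interlaced_perm d = [] := by
  have r1 : PySem.List.pyRange (PySem.Int.mod d 2) d 2 = [] :=
    pv_pyRange_two_nil _ _ (by rw [pv_fmod2]; omega)
  have r2 : PySem.List.pyRange (1 - PySem.Int.mod d 2) d 2 = [] :=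
    pv_pyRange_two_nil _ _ (by rw [pv_fmod2]; omega)
  have h0 : d.toNat = 0 := by omega
  simp only [interlaced_perm, r1, r2, h0, List.replicate_zero, List.foldl_nil]

-- ===== B-side closed forms =====

theorem pv_B_even (m : Nat) :
    interlaced_perm_alt (2 * (m : Int)) = (List.range (2 * m)).map (pvVE m) := by
  have h1 : PySem.Int.floordiv (2 * (m : Int)) 2 = (m : Int) := by rw [pv_fdiv2]; omega
  have h2 : PySem.Int.mod (2 * (m : Int)) 2 = 0 := by rw [pv_fmod2]; omega
  have e1 : PySem.List.pyRange 0 (m : Int) 1 = (List.range m).map (fun k : Nat => ((k : Nat) : Int)) := by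
    rw [PySem.List.pyRange_one]; simp
  have e2 : PySem.List.pyRange (m : Int) (2 * (m : Int)) 1
      = (List.range m).map (fun k : Nat => (m : Int) + (k : Int)) := by
    rw [PySem.List.pyRange_one]
    have hh : (2 * (m : Int) - m).toNat = m := by omega
    rw [hh]
  simp only [interlaced_perm_alt, h1, h2, e1, e2, BEq.rfl, if_true]
  rw [List.zip_map', PySem.List.foldl_append_eq_flatMap, List.flatMap_map]
  rw [if_neg (by simp), pv_map_range_two (pvVE m) m]
  simp only [List.nil_append]
  refine List.flatMap_congr ?_
  intro j hj
  have a1 : 2 * j % 2 = 0 := by omega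
  have a2 : 2 * j / 2 = j := by omega
  have a3 : (2 * j + 1) % 2 = 1 := by omega
  have a4 : (2 * j + 1) / 2 = j := by omega
  simp [pvVE, a1, a2, a3, a4]

theorem pv_zip_longer (f g : Nat → Int) (m : Nat) :
    ((List.range (m + 1)).map f).zip ((List.range m).map g)
      = (List.range m).map (fun j => (f j, g j)) := by
  rw [List.range_succ, List.map_append,
      ← List.append_nil ((List.range m).map g), List.zip_append (by simp)]
  simp [List.zip_map']

theorem pv_B_odd (m : Nat) :
    interlaced_perm_alt (2 * (m : Int) + 1) = (List.range (2 * m + 1)).map (pvVO m) := by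
  have h1 : PySem.Int.floordiv (2 * (m : Int) + 1) 2 = (m : Int) := by rw [pv_fdiv2]; omega
  have h2 : PySem.Int.mod (2 * (m : Int) + 1) 2 = 1 := by rw [pv_fmod2]; omega
  have e1 : PySem.List.pyRange 0 (m : Int) 1 = (List.range m).map (fun k : Nat => ((k : Nat) : Int)) := by
    rw [PySem.List.pyRange_one]; simp
  have e2 : PySem.List.pyRange (m : Int) (2 * (m : Int) + 1) 1
      = (List.range (m + 1)).map (fun k : Nat => (m : Int) + (k : Int)) := by
    rw [PySem.List.pyRange_one]
    have hh : (2 * (m : Int) + 1 - m).toNat = m + 1 := by omega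
    rw [hh]
  simp only [interlaced_perm_alt, h1, h2, e1, e2, show ((1 : Int) == 0) = false from rfl,
    Bool.false_eq_true, if_false]
  rw [pv_zip_longer, PySem.List.foldl_append_eq_flatMap, List.flatMap_map]
  rw [if_pos (by simp)]
  rw [show (List.range (m + 1)).map (fun k : Nat => (m : Int) + (k : Int))
        = (List.range m).map (fun k : Nat => (m : Int) + (k : Int)) ++ [(m : Int) + (m : Int)] by
      rw [List.range_succ, List.map_append]; simp]
  rw [PySem.List.pyGetD_neg_one_append_singleton]
  rw [show 2 * m + 1 = (2 * m) + 1 from rfl, List.range_succ, List.map_append,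
      pv_map_range_two (pvVO m) m]
  simp only [List.nil_append]
  congr 1
  · refine List.flatMap_congr ?_
    intro j hj
    have a1 : 2 * j % 2 = 0 := by omega
    have a2 : 2 * j / 2 = j := by omega
    have a3 : (2 * j + 1) % 2 = 1 := by omega
    have a4 : (2 * j + 1) / 2 = j := by omega
    simp [pvVO, a1, a2, a3, a4]
  · have b1 : 2 * m % 2 = 0 := by omega
    have b2 : 2 * m / 2 = m := by omega
    simp [pvVO, b1, b2]

theorem pv_B_neg (d : Int) (hd : d < 0) : interlaced_perm_alt d = [] := by
  have e1 : PySem.List.pyRange 0 (PySem.Int.floordiv d 2) 1 = [] :=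
    PySem.List.pyRange_one_eq_nil (by rw [pv_fdiv2]; omega)
  have e2 : PySem.List.pyRange (PySem.Int.floordiv d 2) d 1 = [] :=
    PySem.List.pyRange_one_eq_nil (by rw [pv_fdiv2]; omega)
  simp only [interlaced_perm_alt, e1, e2]
  cases h : (PySem.Int.mod d 2 == 0) <;> simp

-- ===== VERDICT (by name: the statement is the Claim_ definition above) =====
theorem interlaced_perm_spec : Claim_equal_interlaced_perm := by
  intro d _
  unfold Spec_interlaced_perm
  rcases lt_or_ge d 0 with hd | hd
  · rw [pv_A_neg d hd, pv_B_neg d hd]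
  · obtain ⟨n, rfl⟩ : ∃ n : Nat, d = (n : Int) := ⟨d.toNat, by omega⟩
    rcases Nat.even_or_odd n with ⟨m, hm⟩ | ⟨m, hm⟩
    · have : (n : Int) = 2 * (m : Int) := by omega
      rw [this, pv_A_even, pv_B_even]
    · have : (n : Int) = 2 * (m : Int) + 1 := by omega
      rw [this, pv_A_odd, pv_B_odd]
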